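-- pv_equiv track=rewrite | github.com/amanalok/python-dsa | course/week3_assignment.py | remdup
-- ===== SOURCE A (Python) =====
-- def remdup(l):
--     ind_to_remove = []
--     size = len(l)
--     i = 0
--     for i in range(size):
--         j = i + 1
--         while j < size:
--             if l[i] == l[j]:
--                 ind_to_remove.append(l[i])
--             j = j + 1
--         i = i + 1
--
--     for item in ind_to_remove:
--         l.remove(item)
--
--     return l
-- ===== SOURCE B (Python) =====
-- def remdup(l):
--     # Deduplicate keeping the last occurrence of each value:
--     # one reverse pass with a seen-set, then restore the original order.
--     seen = set()
--     out = []
--     for x in reversed(l):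
--         if x not in seen:
--             seen.add(x)
--             out.append(x)
--     out.reverse()
--     l[:] = out
--     return l
-- ===== Notes on version B (the rewrite author's own statement) =====
-- stated objective: simpler
-- what changed: Replaced A's nested pairwise scan plus repeated list.remove by a single reverse pass with a seen-set keeping the last occurrence of each value; Pre_ excludes inputs where some value occurs 3+ times, on which A raises ValueError (4+ copies) or accidentally deletes all copies (exactly 3).
-- outside the precondition, e.g. on remdup([1, 1, 1, 2]): A returns [2], B returns [1, 2]; on remdup([1, 1, 1, 1]): A raises ValueError, B returns [1]
import Mathlib
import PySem

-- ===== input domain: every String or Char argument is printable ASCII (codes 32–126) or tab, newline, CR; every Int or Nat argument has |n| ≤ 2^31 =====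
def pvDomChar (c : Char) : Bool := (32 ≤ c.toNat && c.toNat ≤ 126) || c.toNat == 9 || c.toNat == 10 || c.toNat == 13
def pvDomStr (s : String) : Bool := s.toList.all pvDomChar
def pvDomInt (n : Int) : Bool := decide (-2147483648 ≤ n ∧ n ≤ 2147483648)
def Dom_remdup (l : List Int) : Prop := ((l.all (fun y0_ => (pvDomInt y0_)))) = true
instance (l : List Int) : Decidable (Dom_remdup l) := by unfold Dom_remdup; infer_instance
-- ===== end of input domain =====

-- B replaces A's nested pairwise scan + repeated list.remove by one reverse pass with a
-- seen-set, keeping the last occurrence of each value. Both Pythons mutate l in place; the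
-- equivalence proved here is about the returned list.

-- ===== PORT A =====
-- literal transliteration of A; remove? returning none is Python's ValueError, excluded by Pre_remdup
def remdup (l : List Int) : List Int :=
  let size : Int := l.length
  let ind_to_remove : List Int :=
    (PySem.List.pyRange 0 size 1).foldl (fun acc i =>
      (PySem.List.pyRange (i + 1) size 1).foldl (fun acc2 j =>
        if PySem.List.pyGetD l i 0 = PySem.List.pyGetD l j 0 then
          acc2 ++ [PySem.List.pyGetD l i 0]
        else acc2) acc) []
  ind_to_remove.foldl (fun cur item => (PySem.List.remove? cur item).getD cur) l

-- ===== PORT B =====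
def remdup_alt (l : List Int) : List Int :=
  ((l.reverse.foldl (fun (st : PySem.Set Int × List Int) x =>
      if PySem.Set.contains st.1 x then st
      else (PySem.Set.add st.1 x, st.2 ++ [x])) (PySem.Set.empty, [])).2).reverse

-- ===== PRECONDITION & SPEC =====
-- Pre_ excludes inputs where some value occurs 3 or more times: at 4+ occurrences A raises
-- ValueError (it schedules more removals than there are copies), and at exactly 3 its pairwise
-- removal bookkeeping deletes all three copies, an accident of A's implementation no natural
-- deduplication reproduces.
def Pre_remdup (l : List Int) : Prop := ∀ x ∈ l, l.count x ≤ 2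
instance (l : List Int) : Decidable (Pre_remdup l) := by unfold Pre_remdup; infer_instance
def pvWitness_remdup : List Int := [1, 2, 1, 3]

def Spec_remdup (l : List Int) (out : List Int) : Prop := out = remdup_alt l
instance (l : List Int) (out : List Int) : Decidable (Spec_remdup l out) := by unfold Spec_remdup; infer_instance

-- ===== CLAIM (what is proved, stated in full; the proofs are below) =====
def Claim_equal_remdup : Prop := ∀ (l : List Int), Dom_remdup l → Pre_remdup l → Spec_remdup l (remdup l)

-- ===== LEMMAS AND PROOFS =====

-- number of removals A schedules for a value occurring c times
def triN (c : Nat) : Nat := c * (c - 1) / 2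

-- drop, for each value v, the first (m v) occurrences of v (the shape of A's result)
def keepF (m : Int → Nat) : List Int → List Int
  | [] => []
  | x :: xs =>
    if m x = 0 then x :: keepF m xs
    else keepF (fun v => if v = x then m x - 1 else m v) xs

theorem keepF_zero (l : List Int) : keepF (fun _ => 0) l = l := by
  induction l with
  | nil => rfl
  | cons x xs ih => simp [keepF, ih]

theorem keepF_ext {m m' : Int → Nat} (h : ∀ v, m v = m' v) (l : List Int) : keepF m l = keepF m' l := by
  have : m = m' := funext h
  rw [this]

theorem mem_keepF (l : List Int) : ∀ (m : Int → Nat) (v : Int), m v < l.count v → v ∈ keepF m l := by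
  induction l with
  | nil => intro m v h; simp at h
  | cons x xs ih =>
    intro m v h
    by_cases hx : m x = 0
    · by_cases hxv : x = v
      · subst hxv; simp [keepF, hx]
      · have : v ∈ keepF m xs := by
          apply ih
          rw [List.count_cons] at h
          simpa [hxv] using h
        simp [keepF, hx, this]
    · rw [keepF, if_neg hx]
      apply ih
      beta_reduce
      by_cases hxv : v = x
      · subst hxv
        rw [List.count_cons_self] at h
        rw [if_pos rfl]
        omega
      · rw [List.count_cons] at h
        rw [if_neg hxv]
        simpa [Ne.symm hxv] using h

theorem erase_keepF (l : List Int) : ∀ (m : Int → Nat) (v : Int), m v < l.count v →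
    (keepF m l).erase v = keepF (fun w => if w = v then m v + 1 else m w) l := by
  induction l with
  | nil => intro m v h; simp at h
  | cons x xs ih =>
    intro m v h
    by_cases hx : m x = 0
    · by_cases hxv : x = v
      · subst hxv
        rw [keepF, if_pos hx, List.erase_cons_head]
        rw [keepF, if_neg (by simp [hx])]
        refine (keepF_ext (fun w => ?_) xs).symm
        by_cases hwx : w = x <;> simp [hwx, hx]
      · rw [keepF, if_pos hx, List.erase_cons_tail (by simpa using hxv)]
        rw [ih m v (by rw [List.count_cons] at h; simpa [hxv] using h)]
        rw [keepF, if_pos (by simp [hxv, hx])]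
    · rw [keepF, if_neg hx]
      by_cases hxv : x = v
      · subst hxv
        rw [List.count_cons_self] at h
        rw [ih _ x (by rw [if_pos rfl]; omega)]
        have hb : (if x = x then m x + 1 else m x) ≠ 0 := by simp
        rw [keepF, if_neg hb]
        refine keepF_ext (fun w => ?_) xs
        by_cases hwx : w = x <;> simp [hwx] <;> omega
      · have hs : (if v = x then m x - 1 else m v) < List.count v xs := by
          rw [if_neg (Ne.symm hxv)]
          rw [List.count_cons] at h
          simpa [hxv] using h
        rw [ih _ v hs]
        have hb : (if x = v then m v + 1 else m x) ≠ 0 := by simp [hxv, hx]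
        rw [keepF, if_neg hb]
        refine keepF_ext (fun w => ?_) xs
        by_cases hwx : w = x <;> by_cases hwv : w = v <;>
          simp [hwx, hwv, hxv, Ne.symm hxv]

theorem foldl_remove (l : List Int) (r : List Int) : ∀ (m : Int → Nat),
    (∀ v, m v + r.count v ≤ l.count v) →
    r.foldl (fun cur item => (PySem.List.remove? cur item).getD cur) (keepF m l)
      = keepF (fun v => m v + r.count v) l := by
  induction r with
  | nil =>
    intro m hm
    simp only [List.foldl_nil]
    exact keepF_ext (fun v => by simp) l
  | cons x r' ih =>
    intro m hm
    have hx : m x < l.count x := by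
      have := hm x
      rw [List.count_cons_self] at this
      omega
    have hmem : x ∈ keepF m l := mem_keepF l m x hx
    simp only [List.foldl_cons]
    have hrw : PySem.List.remove? (keepF m l) x = some ((keepF m l).erase x) :=
      PySem.List.remove?_eq_some_erase _ x hmem
    rw [hrw, Option.getD_some, erase_keepF l m x hx]
    have hm' : ∀ v, (if v = x then m x + 1 else m v) + r'.count v ≤ l.count v := by
      intro v
      have := hm v
      rw [List.count_cons] at this
      by_cases hvx : v = x <;> simp [hvx] at this ⊢ <;> omega
    rw [ih _ hm']
    refine keepF_ext (fun v => ?_) l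
    rw [List.count_cons]
    by_cases hvx : v = x <;> simp [hvx] <;> omega

theorem triN_succ (c : Nat) : triN (c + 1) = triN c + c := by
  cases c with
  | zero => rfl
  | succ d =>
    show (d + 2) * (d + 1) / 2 = (d + 1) * d / 2 + (d + 1)
    have : (d + 2) * (d + 1) = (d + 1) * d + (d + 1) * 2 := by ring
    rw [this, Nat.add_mul_div_right _ _ (by omega)]

theorem ind_eq (l : List Int) :
    (PySem.List.pyRange 0 (l.length : Int) 1).foldl (fun acc i =>
      (PySem.List.pyRange (i + 1) (l.length : Int) 1).foldl (fun acc2 j =>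
        if PySem.List.pyGetD l i 0 = PySem.List.pyGetD l j 0 then
          acc2 ++ [PySem.List.pyGetD l i 0]
        else acc2) acc) ([] : List Int)
    = (List.range l.length).flatMap (fun k =>
        ((l.drop (k + 1)).filter (fun y => decide (l.getD k 0 = y))).map (fun _ => l.getD k 0)) := by
  have hinner : ∀ (acc : List Int) (i : Int), i ∈ PySem.List.pyRange 0 (l.length : Int) 1 →
      (PySem.List.pyRange (i + 1) (l.length : Int) 1).foldl (fun acc2 j =>
        if PySem.List.pyGetD l i 0 = PySem.List.pyGetD l j 0 then
          acc2 ++ [PySem.List.pyGetD l i 0]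
        else acc2) acc
      = acc ++ ((l.drop (i + 1).toNat).filter
          (fun y => decide (PySem.List.pyGetD l i 0 = y))).map (fun _ => PySem.List.pyGetD l i 0) := by
    intro acc i hi
    rw [PySem.List.mem_pyRange_one] at hi
    rw [PySem.List.foldl_pyRange_pyGetD' l 0
      (fun acc2 y => if PySem.List.pyGetD l i 0 = y then acc2 ++ [PySem.List.pyGetD l i 0] else acc2)
      acc (a := i + 1) (by omega)]
    rw [PySem.List.foldl_append_ite (fun y => PySem.List.pyGetD l i 0 = y)
      (fun _ => PySem.List.pyGetD l i 0)]
  rw [PySem.List.foldl_congr_mem (PySem.List.pyRange 0 (l.length : Int) 1) _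
    (fun acc i => acc ++ ((l.drop (i + 1).toNat).filter
      (fun y => decide (PySem.List.pyGetD l i 0 = y))).map (fun _ => PySem.List.pyGetD l i 0))
    [] hinner]
  rw [PySem.List.foldl_append_eq_flatMap]
  rw [List.nil_append]
  rw [PySem.List.pyRange_zero_nat]
  rw [List.flatMap_map]
  apply List.flatMap_congr
  intro k hk
  simp only [PySem.List.pyGetD_natCast]
  have h1 : ((k : Int) + 1).toNat = k + 1 := by omega
  rw [h1]

theorem sum_tri (l : List Int) (v : Int) :
    ((List.range l.length).map (fun k => if l.getD k 0 = v then (l.drop (k + 1)).count v else 0)).sum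
      = triN (l.count v) := by
  induction l with
  | nil => simp [triN]
  | cons x xs ih =>
    rw [List.length_cons, List.range_succ_eq_map, List.map_cons, List.map_map]
    have hfk : ((List.range xs.length).map
        ((fun k => if (x :: xs).getD k 0 = v then ((x :: xs).drop (k + 1)).count v else 0) ∘ (· + 1)))
        = (List.range xs.length).map (fun k => if xs.getD k 0 = v then (xs.drop (k + 1)).count v else 0) := by
      apply List.map_congr_left
      intro k _
      simp [List.getD_cons_succ, List.drop_succ_cons]
    rw [hfk, List.sum_cons, ih]
    simp only [List.getD_cons_zero, List.drop_succ_cons, List.drop_zero, List.count_cons]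
    by_cases hxv : x = v
    · simp [hxv, triN_succ]; omega
    · simp [hxv, Ne.symm hxv]

theorem count_ind (l : List Int) (v : Int) :
    ((List.range l.length).flatMap (fun k =>
      ((l.drop (k + 1)).filter (fun y => decide (l.getD k 0 = y))).map (fun _ => l.getD k 0))).count v
    = triN (l.count v) := by
  rw [← sum_tri l v]
  induction (List.range l.length) with
  | nil => simp
  | cons k ks ih =>
    rw [List.flatMap_cons, List.count_append, List.map_cons, List.sum_cons, ih]
    congr 1
    rw [List.map_const']
    rw [List.count_replicate]
    have hlen : (List.filter (fun y => decide (l.getD k 0 = y)) (l.drop (k + 1))).length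
        = (l.drop (k + 1)).count (l.getD k 0) := by
      rw [List.count, ← List.countP_eq_length_filter]
      apply List.countP_congr
      intro y _
      simp only [decide_eq_true_eq, beq_iff_eq]
      exact eq_comm
    rw [hlen]
    simp only [beq_iff_eq]
    by_cases hv : l.getD k 0 = v
    · rw [hv]
    · simp only [if_neg hv]

theorem remdup_eq_keepF (l : List Int) (h : Pre_remdup l) :
    remdup l = keepF (fun v => triN (l.count v)) l := by
  have h' : ∀ x ∈ l, l.count x ≤ 2 := h
  have hle : ∀ v, triN (l.count v) ≤ l.count v := by
    intro v
    by_cases hc : l.count v = 0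
    · simp [hc, triN]
    · have hv : v ∈ l := by
        by_contra hnv
        exact hc (List.count_eq_zero.mpr hnv)
      have h3 := h' v hv
      set c := l.count v with hcdef
      interval_cases c <;> decide
  simp only [remdup]
  rw [ind_eq l]
  have hm : ∀ v, (fun _ => (0 : Nat)) v +
      ((List.range l.length).flatMap (fun k =>
        ((l.drop (k + 1)).filter (fun y => decide (l.getD k 0 = y))).map (fun _ => l.getD k 0))).count v
      ≤ l.count v := by
    intro v
    rw [count_ind]
    simpa using hle v
  have hf := foldl_remove l _ (fun _ => 0) hm
  rw [keepF_zero] at hf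
  rw [hf]
  refine keepF_ext (fun v => ?_) l
  rw [count_ind]
  simp

-- ===== B-side lemmas =====

-- first-occurrence dedup of a list, skipping values already seen
def kf (seen : List Int) : List Int → List Int
  | [] => []
  | x :: xs => if x ∈ seen then kf seen xs else x :: kf (x :: seen) xs

-- keep the last occurrence of each value (the common shape of both results outside D_)
def keepLast : List Int → List Int
  | [] => []
  | x :: xs => if x ∈ xs then keepLast xs else x :: keepLast xs

theorem kf_ext : ∀ (r : List Int) (s s' : List Int), (∀ v, v ∈ s ↔ v ∈ s') → kf s r = kf s' r := by
  intro r
  induction r with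
  | nil => intro s s' _; rfl
  | cons x xs ih =>
    intro s s' h
    by_cases hx : x ∈ s
    · rw [kf, if_pos hx, kf, if_pos ((h x).mp hx), ih s s' h]
    · rw [kf, if_neg hx, kf, if_neg (fun hc => hx ((h x).mpr hc))]
      rw [ih (x :: s) (x :: s') (fun v => by simp [h v])]

theorem B_loop (xs : List Int) : ∀ (seen : PySem.Set Int) (out : List Int),
    (xs.foldl (fun (st : PySem.Set Int × List Int) x =>
      if PySem.Set.contains st.1 x then st
      else (PySem.Set.add st.1 x, st.2 ++ [x])) (seen, out)).2
    = out ++ kf seen xs := by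
  induction xs with
  | nil => intro seen out; simp [kf]
  | cons x xs ih =>
    intro seen out
    simp only [List.foldl_cons]
    by_cases hx : x ∈ seen
    · rw [if_pos (by simpa [PySem.Set.contains] using hx)]
      rw [ih, kf, if_pos hx]
    · rw [if_neg (by simpa [PySem.Set.contains] using hx)]
      rw [ih, kf, if_neg hx]
      simp only [PySem.Set.add, PySem.Set.contains]
      rw [if_neg (by simpa using hx)]
      rw [kf_ext xs (seen ++ [x]) (x :: seen) (fun v => by simp; tauto)]
      simp

theorem kf_append_singleton (x : Int) : ∀ (r : List Int) (s : List Int),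
    kf s (r ++ [x]) = kf s r ++ (if x ∈ s ∨ x ∈ r then [] else [x]) := by
  intro r
  induction r with
  | nil =>
    intro s
    by_cases hx : x ∈ s <;> simp [kf, hx]
  | cons y r' ih =>
    intro s
    by_cases hy : y ∈ s
    · rw [List.cons_append, kf, if_pos hy, kf, if_pos hy, ih s]
      congr 1
      by_cases hxy : x = y
      · subst hxy; simp [hy]
      · simp [hxy]
    · rw [List.cons_append, kf, if_neg hy, kf, if_neg hy, ih (y :: s)]
      rw [List.cons_append]
      congr 1
      by_cases hxy : x = y <;> simp [hxy]

theorem kf_reverse (l : List Int) : (kf [] l.reverse).reverse = keepLast l := by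
  induction l with
  | nil => rfl
  | cons x xs ih =>
    rw [List.reverse_cons, kf_append_singleton x xs.reverse []]
    simp only [List.mem_nil_iff, false_or, List.mem_reverse]
    rw [List.reverse_append, ih, keepLast]
    by_cases hx : x ∈ xs <;> simp [hx]

theorem remdup_alt_eq_keepLast (l : List Int) : remdup_alt l = keepLast l := by
  simp only [remdup_alt]
  rw [B_loop l.reverse PySem.Set.empty []]
  rw [List.nil_append]
  exact kf_reverse l

theorem keepF_pred : ∀ (l : List Int), keepF (fun v => l.count v - 1) l = keepLast l := by
  intro l
  induction l with
  | nil => rfl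
  | cons x xs ih =>
    by_cases hx : x ∈ xs
    · have hc : (x :: xs).count x - 1 ≠ 0 := by
        have := List.count_pos_iff.mpr hx
        rw [List.count_cons_self]; omega
      rw [keepF, if_neg hc, keepLast, if_pos hx,
        keepF_ext (m' := fun v => xs.count v - 1) (fun v => by
          by_cases hvx : v = x
          · subst hvx; simp [List.count_cons_self]
          · have hxv : ¬ x = v := fun h => hvx h.symm
            simp [hvx, hxv]) xs]
      exact ih
    · have hc : (x :: xs).count x - 1 = 0 := by
        rw [List.count_cons_self, List.count_eq_zero.mpr hx]
      rw [keepF, if_pos hc, keepLast, if_neg hx,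
        keepF_ext (m' := fun v => xs.count v - 1) (fun v => by
          by_cases hvx : v = x
          · subst hvx; simp [List.count_cons_self, List.count_eq_zero.mpr hx]
          · have hxv : ¬ x = v := fun h => hvx h.symm
            simp [hxv]) xs]
      rw [ih]

-- ===== VERDICT (by name: the statement is the Claim_ definition above) =====
theorem remdup_spec : Claim_equal_remdup := by
  intro l _ hpre
  unfold Spec_remdup
  rw [remdup_eq_keepF l hpre, remdup_alt_eq_keepLast l, ← keepF_pred l]
  refine keepF_ext (fun v => ?_) l
  by_cases hv : v ∈ l
  · have h2 := hpre v hv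
    have h1 : 1 ≤ l.count v := List.count_pos_iff.mpr hv
    set c := l.count v with hcdef
    interval_cases c <;> rfl
  · rw [List.count_eq_zero.mpr hv]
    rfl
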